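-- pv_equiv track=rewrite | github.com/LAISULLAH/AI-VAPT-Project | Backend/core/attack_surface_mapper.py | categorize_paths
-- ===== SOURCE A (Python) =====
-- from typing import List, Dict
--
-- def categorize_paths(paths: List[Dict]) -> Dict:
--     """Categorize discovered paths by type"""
--     categories = {
--         "admin_panels": [],
--         "login_pages": [],
--         "api_endpoints": [],
--         "config_files": [],
--         "backup_files": [],
--         "sensitive_dirs": [],
--         "development": [],
--         "other": []
--     }
--
--     admin_indicators = ["admin", "administrator", "cpanel", "dashboard", "manage", "manager", "backend"]
--     login_indicators = ["login", "signin", "auth"]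
--     api_indicators = ["api", "graphql", "rest", "soap", "swagger"]
--     config_indicators = [".git", ".env", "config", "wp-config", ".htaccess", "web.config"]
--     backup_indicators = ["backup", "bak", "dump", "sql"]
--     dev_indicators = ["dev", "test", "stage", "beta", "alpha"]
--
--     for path_info in paths:
--         path = path_info.get("path", "").lower()
--
--         if any(ind in path for ind in admin_indicators):
--             categories["admin_panels"].append(path_info)
--         elif any(ind in path for ind in login_indicators):
--             categories["login_pages"].append(path_info)
--         elif any(ind in path for ind in api_indicators):
--             categories["api_endpoints"].append(path_info)
--         elif any(ind in path for ind in config_indicators):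
--             categories["config_files"].append(path_info)
--         elif any(ind in path for ind in backup_indicators):
--             categories["backup_files"].append(path_info)
--         elif any(ind in path for ind in dev_indicators):
--             categories["development"].append(path_info)
--         elif path.count("/") > 2:  # Deep paths might be sensitive directories
--             categories["sensitive_dirs"].append(path_info)
--         else:
--             categories["other"].append(path_info)
--
--     return categories
-- ===== SOURCE B (Python) =====
-- from typing import List, Dict
--
-- def categorize_paths(paths: List[Dict]) -> Dict:
--     """Categorize discovered paths by type (sieve: one stable partition pass per rule)."""
--     rules = [
--         ("admin_panels", ["admin", "administrator", "cpanel", "dashboard", "manage", "manager", "backend"]),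
--         ("login_pages", ["login", "signin", "auth"]),
--         ("api_endpoints", ["api", "graphql", "rest", "soap", "swagger"]),
--         ("config_files", [".git", ".env", "config", "wp-config", ".htaccess", "web.config"]),
--         ("backup_files", ["backup", "bak", "dump", "sql"]),
--         ("development", ["dev", "test", "stage", "beta", "alpha"]),
--     ]
--
--     def matches(indicators, path_info):
--         path = path_info.get("path", "").lower()
--         return any(ind in path for ind in indicators)
--
--     def deep(path_info):
--         return path_info.get("path", "").lower().count("/") > 2
--
--     buckets = {}
--     remaining = paths
--     for key, indicators in rules:
--         buckets[key] = [p for p in remaining if matches(indicators, p)]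
--         remaining = [p for p in remaining if not matches(indicators, p)]
--
--     return {
--         "admin_panels": buckets["admin_panels"],
--         "login_pages": buckets["login_pages"],
--         "api_endpoints": buckets["api_endpoints"],
--         "config_files": buckets["config_files"],
--         "backup_files": buckets["backup_files"],
--         "sensitive_dirs": [p for p in remaining if deep(p)],
--         "development": buckets["development"],
--         "other": [p for p in remaining if not deep(p)],
--     }
-- ===== Notes on version B (the rewrite author's own statement) =====
-- stated objective: alternative
-- what changed: A makes a single pass over the paths with an eight-branch if/elif ladder appending each path into its bucket; B is a sieve: one stable partition pass per rule, peeling the matching paths off the remaining list rule by rule (priority comes from removal, not from branch order), then splitting the final leftovers by path depth.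
import Mathlib
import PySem

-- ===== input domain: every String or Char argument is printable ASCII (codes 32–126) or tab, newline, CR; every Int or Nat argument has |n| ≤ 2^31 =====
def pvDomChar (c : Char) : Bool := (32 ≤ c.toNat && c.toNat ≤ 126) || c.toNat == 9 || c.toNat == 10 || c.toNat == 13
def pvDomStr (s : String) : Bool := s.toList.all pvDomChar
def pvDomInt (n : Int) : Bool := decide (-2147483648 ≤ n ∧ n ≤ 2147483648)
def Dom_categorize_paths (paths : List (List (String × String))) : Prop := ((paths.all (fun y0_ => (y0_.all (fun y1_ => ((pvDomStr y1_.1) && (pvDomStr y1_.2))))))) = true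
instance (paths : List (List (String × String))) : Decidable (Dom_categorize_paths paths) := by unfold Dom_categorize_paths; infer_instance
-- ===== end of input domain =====

-- B replaces A's single pass with an eight-branch if/elif ladder by a sieve: one stable
-- partition pass per rule, peeling matches off the remaining paths (objective: alternative).

-- ===== PORT A =====
-- path_info.get("path", "").lower()  (assoc-list dict: first match)
def getPathLower (path_info : List (String × String)) : String :=
  PySem.Str.lower (((path_info.find? (fun kv => kv.1 == "path")).map Prod.snd).getD "")

def admin_indicators : List String := ["admin", "administrator", "cpanel", "dashboard", "manage", "manager", "backend"]
def login_indicators : List String := ["login", "signin", "auth"]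
def api_indicators : List String := ["api", "graphql", "rest", "soap", "swagger"]
def config_indicators : List String := [".git", ".env", "config", "wp-config", ".htaccess", "web.config"]
def backup_indicators : List String := ["backup", "bak", "dump", "sql"]
def dev_indicators : List String := ["dev", "test", "stage", "beta", "alpha"]

structure Cats where
  admin : List (List (String × String))
  login : List (List (String × String))
  api : List (List (String × String))
  config : List (List (String × String))
  backup : List (List (String × String))
  sens : List (List (String × String))
  dev : List (List (String × String))
  other : List (List (String × String))
deriving Repr, DecidableEq

-- one iteration of A's loop body
def aStep (c : Cats) (path_info : List (String × String)) : Cats :=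
  let path := getPathLower path_info
  if admin_indicators.any (fun ind => PySem.Str.isIn ind path) then
    { c with admin := c.admin ++ [path_info] }
  else if login_indicators.any (fun ind => PySem.Str.isIn ind path) then
    { c with login := c.login ++ [path_info] }
  else if api_indicators.any (fun ind => PySem.Str.isIn ind path) then
    { c with api := c.api ++ [path_info] }
  else if config_indicators.any (fun ind => PySem.Str.isIn ind path) then
    { c with config := c.config ++ [path_info] }
  else if backup_indicators.any (fun ind => PySem.Str.isIn ind path) then
    { c with backup := c.backup ++ [path_info] }
  else if dev_indicators.any (fun ind => PySem.Str.isIn ind path) then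
    { c with dev := c.dev ++ [path_info] }
  else if PySem.Str.count path "/" > 2 then
    { c with sens := c.sens ++ [path_info] }
  else
    { c with other := c.other ++ [path_info] }

def categorize_paths (paths : List (List (String × String))) : List (String × List (List (String × String))) :=
  let r := paths.foldl aStep ⟨[], [], [], [], [], [], [], []⟩
  [("admin_panels", r.admin), ("login_pages", r.login), ("api_endpoints", r.api),
   ("config_files", r.config), ("backup_files", r.backup), ("sensitive_dirs", r.sens),
   ("development", r.dev), ("other", r.other)]

-- ===== PORT B =====
def bRules : List (String × List String) :=
  [("admin_panels", ["admin", "administrator", "cpanel", "dashboard", "manage", "manager", "backend"]),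
   ("login_pages", ["login", "signin", "auth"]),
   ("api_endpoints", ["api", "graphql", "rest", "soap", "swagger"]),
   ("config_files", [".git", ".env", "config", "wp-config", ".htaccess", "web.config"]),
   ("backup_files", ["backup", "bak", "dump", "sql"]),
   ("development", ["dev", "test", "stage", "beta", "alpha"])]

def bMatches (indicators : List String) (path_info : List (String × String)) : Bool :=
  let path := PySem.Str.lower (((path_info.find? (fun kv => kv.1 == "path")).map Prod.snd).getD "")
  indicators.any (fun ind => PySem.Str.isIn ind path)

def bDeep (path_info : List (String × String)) : Bool :=
  PySem.Str.count (PySem.Str.lower (((path_info.find? (fun kv => kv.1 == "path")).map Prod.snd).getD "")) "/" > 2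

-- the for-loop over the rules: buckets dict grows, remaining shrinks
def bSieve (rules : List (String × List String)) (remaining : List (List (String × String))) :
    List (String × List (List (String × String))) × List (List (String × String)) :=
  match rules with
  | [] => ([], remaining)
  | (key, indicators) :: rs =>
      let hit := remaining.filter (fun p => bMatches indicators p)
      let rest := remaining.filter (fun p => !bMatches indicators p)
      let (bs, rem) := bSieve rs rest
      ((key, hit) :: bs, rem)

def bGet (buckets : List (String × List (List (String × String)))) (k : String) :
    List (List (String × String)) :=
  ((buckets.find? (fun kv => kv.1 == k)).map Prod.snd).getD []

def categorize_paths_alt (paths : List (List (String × String))) : List (String × List (List (String × String))) :=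
  let (buckets, remaining) := bSieve bRules paths
  [("admin_panels", bGet buckets "admin_panels"),
   ("login_pages", bGet buckets "login_pages"),
   ("api_endpoints", bGet buckets "api_endpoints"),
   ("config_files", bGet buckets "config_files"),
   ("backup_files", bGet buckets "backup_files"),
   ("sensitive_dirs", remaining.filter (fun p => bDeep p)),
   ("development", bGet buckets "development"),
   ("other", remaining.filter (fun p => !bDeep p))]

-- ===== PRECONDITION & SPEC =====
def Spec_categorize_paths (paths : List (List (String × String))) (out : List (String × List (List (String × String)))) : Prop := out = categorize_paths_alt paths
instance (paths : List (List (String × String))) (out : List (String × List (List (String × String)))) : Decidable (Spec_categorize_paths paths out) := by unfold Spec_categorize_paths; infer_instance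

-- ===== CLAIM (what is proved, stated in full; the proofs are below) =====
def Claim_equal_categorize_paths : Prop := ∀ (paths : List (List (String × String))), Dom_categorize_paths paths → Spec_categorize_paths paths (categorize_paths paths)

-- ===== LEMMAS AND PROOFS =====

-- proof-side classification: the value of A's if/elif ladder for one path
def cls (p : List (String × String)) : String :=
  if admin_indicators.any (fun ind => PySem.Str.isIn ind (getPathLower p)) then "admin_panels"
  else if login_indicators.any (fun ind => PySem.Str.isIn ind (getPathLower p)) then "login_pages"
  else if api_indicators.any (fun ind => PySem.Str.isIn ind (getPathLower p)) then "api_endpoints"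
  else if config_indicators.any (fun ind => PySem.Str.isIn ind (getPathLower p)) then "config_files"
  else if backup_indicators.any (fun ind => PySem.Str.isIn ind (getPathLower p)) then "backup_files"
  else if dev_indicators.any (fun ind => PySem.Str.isIn ind (getPathLower p)) then "development"
  else if PySem.Str.count (getPathLower p) "/" > 2 then "sensitive_dirs"
  else "other"

-- A's fold accumulates, in each bucket, exactly the paths classified with that bucket's key
theorem foldA_eq (paths : List (List (String × String))) (acc : Cats) :
    paths.foldl aStep acc =
      ⟨acc.admin ++ paths.filter (fun p => cls p == "admin_panels"),
       acc.login ++ paths.filter (fun p => cls p == "login_pages"),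
       acc.api ++ paths.filter (fun p => cls p == "api_endpoints"),
       acc.config ++ paths.filter (fun p => cls p == "config_files"),
       acc.backup ++ paths.filter (fun p => cls p == "backup_files"),
       acc.sens ++ paths.filter (fun p => cls p == "sensitive_dirs"),
       acc.dev ++ paths.filter (fun p => cls p == "development"),
       acc.other ++ paths.filter (fun p => cls p == "other")⟩ := by
  induction paths generalizing acc with
  | nil => cases acc; simp
  | cons p ps ih =>
    rw [List.foldl_cons, ih]
    simp only [aStep]
    cases h1 : admin_indicators.any (fun ind => PySem.Str.isIn ind (getPathLower p))
    case true =>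
      have hc : cls p = "admin_panels" := by rw [cls, if_pos h1]
      cases acc; simp [h1, hc]
    case false =>
    cases h2 : login_indicators.any (fun ind => PySem.Str.isIn ind (getPathLower p))
    case true =>
      have hc : cls p = "login_pages" := by rw [cls, if_neg (by rw [h1]; simp), if_pos h2]
      cases acc; simp [h1, h2, hc]
    case false =>
    cases h3 : api_indicators.any (fun ind => PySem.Str.isIn ind (getPathLower p))
    case true =>
      have hc : cls p = "api_endpoints" := by rw [cls, if_neg (by rw [h1]; simp), if_neg (by rw [h2]; simp), if_pos h3]
      cases acc; simp [h1, h2, h3, hc]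
    case false =>
    cases h4 : config_indicators.any (fun ind => PySem.Str.isIn ind (getPathLower p))
    case true =>
      have hc : cls p = "config_files" := by rw [cls, if_neg (by rw [h1]; simp), if_neg (by rw [h2]; simp), if_neg (by rw [h3]; simp), if_pos h4]
      cases acc; simp [h1, h2, h3, h4, hc]
    case false =>
    cases h5 : backup_indicators.any (fun ind => PySem.Str.isIn ind (getPathLower p))
    case true =>
      have hc : cls p = "backup_files" := by rw [cls, if_neg (by rw [h1]; simp), if_neg (by rw [h2]; simp), if_neg (by rw [h3]; simp), if_neg (by rw [h4]; simp), if_pos h5]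
      cases acc; simp [h1, h2, h3, h4, h5, hc]
    case false =>
    cases h6 : dev_indicators.any (fun ind => PySem.Str.isIn ind (getPathLower p))
    case true =>
      have hc : cls p = "development" := by rw [cls, if_neg (by rw [h1]; simp), if_neg (by rw [h2]; simp), if_neg (by rw [h3]; simp), if_neg (by rw [h4]; simp), if_neg (by rw [h5]; simp), if_pos h6]
      cases acc; simp [h1, h2, h3, h4, h5, h6, hc]
    case false =>
    by_cases h7 : 2 < PySem.Str.count (getPathLower p) "/"
    case pos =>
      have hc : cls p = "sensitive_dirs" := by rw [cls, if_neg (by rw [h1]; simp), if_neg (by rw [h2]; simp), if_neg (by rw [h3]; simp), if_neg (by rw [h4]; simp), if_neg (by rw [h5]; simp), if_neg (by rw [h6]; simp), if_pos h7]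
      simp [PySem.Str.count] at h7
      cases acc; simp [h1, h2, h3, h4, h5, h6, h7, hc]
    case neg =>
      have hc : cls p = "other" := by rw [cls, if_neg (by rw [h1]; simp), if_neg (by rw [h2]; simp), if_neg (by rw [h3]; simp), if_neg (by rw [h4]; simp), if_neg (by rw [h5]; simp), if_neg (by rw [h6]; simp), if_neg h7]
      simp [PySem.Str.count] at h7
      cases acc; simp [h1, h2, h3, h4, h5, h6, hc, not_lt.mpr h7]

-- bridge rfl-lemmas: B's helpers are definitionally A's tests
theorem bM1 (p : List (String × String)) : bMatches ["admin", "administrator", "cpanel", "dashboard", "manage", "manager", "backend"] p = (admin_indicators.any (fun ind => PySem.Str.isIn ind (getPathLower p))) := rfl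
theorem bM2 (p : List (String × String)) : bMatches ["login", "signin", "auth"] p = (login_indicators.any (fun ind => PySem.Str.isIn ind (getPathLower p))) := rfl
theorem bM3 (p : List (String × String)) : bMatches ["api", "graphql", "rest", "soap", "swagger"] p = (api_indicators.any (fun ind => PySem.Str.isIn ind (getPathLower p))) := rfl
theorem bM4 (p : List (String × String)) : bMatches [".git", ".env", "config", "wp-config", ".htaccess", "web.config"] p = (config_indicators.any (fun ind => PySem.Str.isIn ind (getPathLower p))) := rfl
theorem bM5 (p : List (String × String)) : bMatches ["backup", "bak", "dump", "sql"] p = (backup_indicators.any (fun ind => PySem.Str.isIn ind (getPathLower p))) := rfl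
theorem bM6 (p : List (String × String)) : bMatches ["dev", "test", "stage", "beta", "alpha"] p = (dev_indicators.any (fun ind => PySem.Str.isIn ind (getPathLower p))) := rfl
theorem bDeep_eq (p : List (String × String)) : bDeep p = decide (2 < PySem.Str.count (getPathLower p) "/") := rfl

-- characterization of cls, one key at a time
theorem cls_iff_1 (p : List (String × String)) : cls p = "admin_panels" ↔ ((admin_indicators.any (fun ind => PySem.Str.isIn ind (getPathLower p))) = true) := by
  rw [cls]; split_ifs <;> simp_all

theorem cls_iff_2 (p : List (String × String)) : cls p = "login_pages" ↔ ((admin_indicators.any (fun ind => PySem.Str.isIn ind (getPathLower p))) = false ∧ (login_indicators.any (fun ind => PySem.Str.isIn ind (getPathLower p))) = true) := by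
  rw [cls]; split_ifs <;> simp_all

theorem cls_iff_3 (p : List (String × String)) : cls p = "api_endpoints" ↔ ((admin_indicators.any (fun ind => PySem.Str.isIn ind (getPathLower p))) = false ∧ (login_indicators.any (fun ind => PySem.Str.isIn ind (getPathLower p))) = false ∧ (api_indicators.any (fun ind => PySem.Str.isIn ind (getPathLower p))) = true) := by
  rw [cls]; split_ifs <;> simp_all

theorem cls_iff_4 (p : List (String × String)) : cls p = "config_files" ↔ ((admin_indicators.any (fun ind => PySem.Str.isIn ind (getPathLower p))) = false ∧ (login_indicators.any (fun ind => PySem.Str.isIn ind (getPathLower p))) = false ∧ (api_indicators.any (fun ind => PySem.Str.isIn ind (getPathLower p))) = false ∧ (config_indicators.any (fun ind => PySem.Str.isIn ind (getPathLower p))) = true) := by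
  rw [cls]; split_ifs <;> simp_all

theorem cls_iff_5 (p : List (String × String)) : cls p = "backup_files" ↔ ((admin_indicators.any (fun ind => PySem.Str.isIn ind (getPathLower p))) = false ∧ (login_indicators.any (fun ind => PySem.Str.isIn ind (getPathLower p))) = false ∧ (api_indicators.any (fun ind => PySem.Str.isIn ind (getPathLower p))) = false ∧ (config_indicators.any (fun ind => PySem.Str.isIn ind (getPathLower p))) = false ∧ (backup_indicators.any (fun ind => PySem.Str.isIn ind (getPathLower p))) = true) := by
  rw [cls]; split_ifs <;> simp_all

theorem cls_iff_6 (p : List (String × String)) : cls p = "development" ↔ ((admin_indicators.any (fun ind => PySem.Str.isIn ind (getPathLower p))) = false ∧ (login_indicators.any (fun ind => PySem.Str.isIn ind (getPathLower p))) = false ∧ (api_indicators.any (fun ind => PySem.Str.isIn ind (getPathLower p))) = false ∧ (config_indicators.any (fun ind => PySem.Str.isIn ind (getPathLower p))) = false ∧ (backup_indicators.any (fun ind => PySem.Str.isIn ind (getPathLower p))) = false ∧ (dev_indicators.any (fun ind => PySem.Str.isIn ind (getPathLower p))) = true) := by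
  rw [cls]; split_ifs <;> simp_all

theorem cls_iff_7 (p : List (String × String)) : cls p = "sensitive_dirs" ↔ ((admin_indicators.any (fun ind => PySem.Str.isIn ind (getPathLower p))) = false ∧ (login_indicators.any (fun ind => PySem.Str.isIn ind (getPathLower p))) = false ∧ (api_indicators.any (fun ind => PySem.Str.isIn ind (getPathLower p))) = false ∧ (config_indicators.any (fun ind => PySem.Str.isIn ind (getPathLower p))) = false ∧ (backup_indicators.any (fun ind => PySem.Str.isIn ind (getPathLower p))) = false ∧ (dev_indicators.any (fun ind => PySem.Str.isIn ind (getPathLower p))) = false ∧ 2 < PySem.Str.count (getPathLower p) "/") := by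
  rw [cls]; split_ifs <;> simp_all

theorem cls_iff_8 (p : List (String × String)) : cls p = "other" ↔ ((admin_indicators.any (fun ind => PySem.Str.isIn ind (getPathLower p))) = false ∧ (login_indicators.any (fun ind => PySem.Str.isIn ind (getPathLower p))) = false ∧ (api_indicators.any (fun ind => PySem.Str.isIn ind (getPathLower p))) = false ∧ (config_indicators.any (fun ind => PySem.Str.isIn ind (getPathLower p))) = false ∧ (backup_indicators.any (fun ind => PySem.Str.isIn ind (getPathLower p))) = false ∧ (dev_indicators.any (fun ind => PySem.Str.isIn ind (getPathLower p))) = false ∧ ¬ (2 < PySem.Str.count (getPathLower p) "/")) := by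
  rw [cls]; split_ifs <;> simp_all

theorem eq_1 (paths : List (List (String × String))) :
    List.filter (fun p => bMatches ["admin", "administrator", "cpanel", "dashboard", "manage", "manager", "backend"] p) paths = List.filter (fun p => cls p == "admin_panels") paths := by
  refine List.filter_congr (fun p _ => ?_)
  rw [Bool.eq_iff_iff]
  simp only [bM1, bM2, bM3, bM4, bM5, bM6, bDeep_eq, Bool.and_eq_true, Bool.not_eq_true', beq_iff_eq, decide_eq_true_eq, decide_eq_false_iff_not, and_assoc, cls_iff_1]

theorem eq_2 (paths : List (List (String × String))) :
    List.filter (fun p => bMatches ["login", "signin", "auth"] p) (List.filter (fun p => !bMatches ["admin", "administrator", "cpanel", "dashboard", "manage", "manager", "backend"] p) paths) = List.filter (fun p => cls p == "login_pages") paths := by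
  simp only [List.filter_filter]
  refine List.filter_congr (fun p _ => ?_)
  rw [Bool.eq_iff_iff]
  simp only [bM1, bM2, bM3, bM4, bM5, bM6, bDeep_eq, Bool.and_eq_true, Bool.not_eq_true', beq_iff_eq, decide_eq_true_eq, decide_eq_false_iff_not, and_assoc, cls_iff_2, and_comm, and_left_comm]

theorem eq_3 (paths : List (List (String × String))) :
    List.filter (fun p => bMatches ["api", "graphql", "rest", "soap", "swagger"] p) (List.filter (fun p => !bMatches ["login", "signin", "auth"] p) (List.filter (fun p => !bMatches ["admin", "administrator", "cpanel", "dashboard", "manage", "manager", "backend"] p) paths)) = List.filter (fun p => cls p == "api_endpoints") paths := by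
  simp only [List.filter_filter]
  refine List.filter_congr (fun p _ => ?_)
  rw [Bool.eq_iff_iff]
  simp only [bM1, bM2, bM3, bM4, bM5, bM6, bDeep_eq, Bool.and_eq_true, Bool.not_eq_true', beq_iff_eq, decide_eq_true_eq, decide_eq_false_iff_not, and_assoc, cls_iff_3, and_comm, and_left_comm]

theorem eq_4 (paths : List (List (String × String))) :
    List.filter (fun p => bMatches [".git", ".env", "config", "wp-config", ".htaccess", "web.config"] p) (List.filter (fun p => !bMatches ["api", "graphql", "rest", "soap", "swagger"] p) (List.filter (fun p => !bMatches ["login", "signin", "auth"] p) (List.filter (fun p => !bMatches ["admin", "administrator", "cpanel", "dashboard", "manage", "manager", "backend"] p) paths))) = List.filter (fun p => cls p == "config_files") paths := by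
  simp only [List.filter_filter]
  refine List.filter_congr (fun p _ => ?_)
  rw [Bool.eq_iff_iff]
  simp only [bM1, bM2, bM3, bM4, bM5, bM6, bDeep_eq, Bool.and_eq_true, Bool.not_eq_true', beq_iff_eq, decide_eq_true_eq, decide_eq_false_iff_not, and_assoc, cls_iff_4, and_comm, and_left_comm]

theorem eq_5 (paths : List (List (String × String))) :
    List.filter (fun p => bMatches ["backup", "bak", "dump", "sql"] p) (List.filter (fun p => !bMatches [".git", ".env", "config", "wp-config", ".htaccess", "web.config"] p) (List.filter (fun p => !bMatches ["api", "graphql", "rest", "soap", "swagger"] p) (List.filter (fun p => !bMatches ["login", "signin", "auth"] p) (List.filter (fun p => !bMatches ["admin", "administrator", "cpanel", "dashboard", "manage", "manager", "backend"] p) paths)))) = List.filter (fun p => cls p == "backup_files") paths := by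
  simp only [List.filter_filter]
  refine List.filter_congr (fun p _ => ?_)
  rw [Bool.eq_iff_iff]
  simp only [bM1, bM2, bM3, bM4, bM5, bM6, bDeep_eq, Bool.and_eq_true, Bool.not_eq_true', beq_iff_eq, decide_eq_true_eq, decide_eq_false_iff_not, and_assoc, cls_iff_5, and_comm, and_left_comm]

theorem eq_6 (paths : List (List (String × String))) :
    List.filter (fun p => bMatches ["dev", "test", "stage", "beta", "alpha"] p) (List.filter (fun p => !bMatches ["backup", "bak", "dump", "sql"] p) (List.filter (fun p => !bMatches [".git", ".env", "config", "wp-config", ".htaccess", "web.config"] p) (List.filter (fun p => !bMatches ["api", "graphql", "rest", "soap", "swagger"] p) (List.filter (fun p => !bMatches ["login", "signin", "auth"] p) (List.filter (fun p => !bMatches ["admin", "administrator", "cpanel", "dashboard", "manage", "manager", "backend"] p) paths))))) = List.filter (fun p => cls p == "development") paths := by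
  simp only [List.filter_filter]
  refine List.filter_congr (fun p _ => ?_)
  rw [Bool.eq_iff_iff]
  simp only [bM1, bM2, bM3, bM4, bM5, bM6, bDeep_eq, Bool.and_eq_true, Bool.not_eq_true', beq_iff_eq, decide_eq_true_eq, decide_eq_false_iff_not, and_assoc, cls_iff_6, and_comm, and_left_comm]

theorem eq_7 (paths : List (List (String × String))) :
    List.filter (fun p => bDeep p) (List.filter (fun p => !bMatches ["dev", "test", "stage", "beta", "alpha"] p) (List.filter (fun p => !bMatches ["backup", "bak", "dump", "sql"] p) (List.filter (fun p => !bMatches [".git", ".env", "config", "wp-config", ".htaccess", "web.config"] p) (List.filter (fun p => !bMatches ["api", "graphql", "rest", "soap", "swagger"] p) (List.filter (fun p => !bMatches ["login", "signin", "auth"] p) (List.filter (fun p => !bMatches ["admin", "administrator", "cpanel", "dashboard", "manage", "manager", "backend"] p) paths)))))) = List.filter (fun p => cls p == "sensitive_dirs") paths := by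
  simp only [List.filter_filter]
  refine List.filter_congr (fun p _ => ?_)
  rw [Bool.eq_iff_iff]
  simp only [bM1, bM2, bM3, bM4, bM5, bM6, bDeep_eq, Bool.and_eq_true, Bool.not_eq_true', beq_iff_eq, decide_eq_true_eq, decide_eq_false_iff_not, and_assoc, cls_iff_7, and_comm, and_left_comm]

theorem eq_8 (paths : List (List (String × String))) :
    List.filter (fun p => !bDeep p) (List.filter (fun p => !bMatches ["dev", "test", "stage", "beta", "alpha"] p) (List.filter (fun p => !bMatches ["backup", "bak", "dump", "sql"] p) (List.filter (fun p => !bMatches [".git", ".env", "config", "wp-config", ".htaccess", "web.config"] p) (List.filter (fun p => !bMatches ["api", "graphql", "rest", "soap", "swagger"] p) (List.filter (fun p => !bMatches ["login", "signin", "auth"] p) (List.filter (fun p => !bMatches ["admin", "administrator", "cpanel", "dashboard", "manage", "manager", "backend"] p) paths)))))) = List.filter (fun p => cls p == "other") paths := by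
  simp only [List.filter_filter]
  refine List.filter_congr (fun p _ => ?_)
  rw [Bool.eq_iff_iff]
  simp only [bM1, bM2, bM3, bM4, bM5, bM6, bDeep_eq, Bool.and_eq_true, Bool.not_eq_true', beq_iff_eq, decide_eq_true_eq, decide_eq_false_iff_not, and_assoc, cls_iff_8, and_comm, and_left_comm]

set_option maxHeartbeats 1000000 in
theorem categorize_paths_spec : Claim_equal_categorize_paths := by
  intro paths _
  unfold Spec_categorize_paths
  rw [categorize_paths]
  rw [foldA_eq]
  simp only [categorize_paths_alt, bRules, bSieve, bGet]
  simp only [List.find?, String.reduceBEq, beq_self_eq_true, Option.map_some, Option.getD_some]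
  rw [eq_1, eq_2, eq_3, eq_4, eq_5, eq_6, eq_7, eq_8]
  simp
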